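-- pv_equiv track=rewrite | github.com/MTGR20/OnlyOne | toDB.py | find_facnum
-- ===== SOURCE A (Python) =====
-- def find_facnum(fac_index):
--     f = 0
--     point = 0
--     for i in range(len(fac_index) - 1):
--         if (fac_index[i + 1] - fac_index[i] < 2):
--             if (point == 0):
--                 f = fac_index[i]
--             point += 1
--             if (point >= 3):
--                 return f
--         else:
--             f = 0
--             point = 0
--     return -1
-- ===== SOURCE B (Python) =====
-- def find_facnum(fac_index):
--     # Precompute the "small gap" flags, then look for the first window of
--     # three consecutive flags that are all true.
--     small = [b - a < 2 for a, b in zip(fac_index, fac_index[1:])]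
--     for x, s0, s1, s2 in zip(fac_index, small, small[1:], small[2:]):
--         if s0 and s1 and s2:
--             return x
--     return -1
-- ===== Notes on version B (the rewrite author's own statement) =====
-- stated objective: alternative
-- what changed: Replaces A's incremental run-counter state machine (f/point updated per step, early return when the counter hits 3) by a precomputed list of small-gap flags followed by a fixed-width window search for three consecutive true flags.
import Mathlib
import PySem

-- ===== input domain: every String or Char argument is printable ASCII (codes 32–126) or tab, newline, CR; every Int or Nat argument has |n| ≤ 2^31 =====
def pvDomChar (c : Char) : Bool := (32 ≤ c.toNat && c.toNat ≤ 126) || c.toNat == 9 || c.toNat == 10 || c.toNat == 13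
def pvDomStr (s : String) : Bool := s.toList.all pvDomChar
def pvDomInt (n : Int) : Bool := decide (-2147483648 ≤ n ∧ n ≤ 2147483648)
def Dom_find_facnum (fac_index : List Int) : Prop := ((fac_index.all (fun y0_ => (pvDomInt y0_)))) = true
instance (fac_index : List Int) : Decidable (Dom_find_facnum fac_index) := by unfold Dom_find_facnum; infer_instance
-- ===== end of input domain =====

-- B replaces A's run-counter state machine by a precomputed list of gap flags
-- plus a three-wide window search; same result, same O(n) cost (objective: alternative).

-- ===== PORT A =====
-- A iterates i over range(len(fac_index) - 1) touching the consecutive pair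
-- (fac_index[i], fac_index[i+1]); the recursion walks the same consecutive pairs
-- with the same state (f, point), the same branch order and the same early return.
def find_facnum_go : List Int → Int → Int → Int
  | x :: y :: rest, f, point =>
      if y - x < 2 then
        let f' := if point = 0 then x else f
        let point' := point + 1
        if point' ≥ 3 then f' else find_facnum_go (y :: rest) f' point'
      else find_facnum_go (y :: rest) 0 0
  | _, _, _ => -1

def find_facnum (fac_index : List Int) : Int := find_facnum_go fac_index 0 0

-- ===== PORT B =====
-- small = [b - a < 2 for a, b in zip(fac_index, fac_index[1:])]
def find_facnum_small (fac_index : List Int) : List Bool :=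
  (fac_index.zip fac_index.tail).map (fun p => decide (p.2 - p.1 < 2))

-- for x, s0, s1, s2 in zip(fac_index, small, small[1:], small[2:]): the recursion
-- consumes the element list and the flag list in parallel, the three pattern heads
-- being the current positions of small, small[1:] and small[2:] (zip stops when
-- fewer than three flags remain, exactly as the shortest zipped list does).
def find_facnum_win : List Int → List Bool → Int
  | x :: xs, s0 :: s1 :: s2 :: ss =>
      if s0 && s1 && s2 then x else find_facnum_win xs (s1 :: s2 :: ss)
  | _, _ => -1

def find_facnum_alt (fac_index : List Int) : Int :=
  find_facnum_win fac_index (find_facnum_small fac_index)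

-- ===== PRECONDITION & SPEC =====
def Spec_find_facnum (fac_index : List Int) (out : Int) : Prop := out = find_facnum_alt fac_index
instance (fac_index : List Int) (out : Int) : Decidable (Spec_find_facnum fac_index out) := by unfold Spec_find_facnum; infer_instance

-- ===== CLAIM (what is proved, stated in full; the proofs are below) =====
def Claim_equal_find_facnum : Prop := ∀ (fac_index : List Int), Dom_find_facnum fac_index → Spec_find_facnum fac_index (find_facnum fac_index)

-- ===== LEMMAS AND PROOFS =====

theorem ff_small_cons (x y : Int) (rest : List Int) :
    find_facnum_small (x :: y :: rest)
      = decide (y - x < 2) :: find_facnum_small (y :: rest) := by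
  simp [find_facnum_small]

theorem ff_small_one (x : Int) : find_facnum_small [x] = [] := rfl

theorem ff_win_cons (x : Int) (xs : List Int) (s0 s1 s2 : Bool) (ss : List Bool) :
    find_facnum_win (x :: xs) (s0 :: s1 :: s2 :: ss)
      = if s0 && s1 && s2 then x else find_facnum_win xs (s1 :: s2 :: ss) := rfl

theorem ff_win_short (l : List Int) (a b : Bool) : find_facnum_win l [a, b] = -1 := by
  cases l <;> rfl

theorem ff_go_cons (x y : Int) (rest : List Int) (f point : Int) :
    find_facnum_go (x :: y :: rest) f point
      = if y - x < 2 then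
          (if point + 1 ≥ 3 then (if point = 0 then x else f)
           else find_facnum_go (y :: rest) (if point = 0 then x else f) (point + 1))
        else find_facnum_go (y :: rest) 0 0 := by
  simp only [find_facnum_go]

theorem ff_go_step0 (x y : Int) (rest : List Int) (h : y - x < 2) :
    find_facnum_go (x :: y :: rest) 0 0 = find_facnum_go (y :: rest) x 1 := by
  rw [ff_go_cons, if_pos h]; norm_num

theorem ff_go_step1 (x y : Int) (rest : List Int) (f : Int) (h : y - x < 2) :
    find_facnum_go (x :: y :: rest) f 1 = find_facnum_go (y :: rest) f 2 := by
  rw [ff_go_cons, if_pos h]; norm_num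

theorem ff_go_step2 (x y : Int) (rest : List Int) (f : Int) (h : y - x < 2) :
    find_facnum_go (x :: y :: rest) f 2 = f := by
  rw [ff_go_cons, if_pos h]; norm_num

theorem ff_go_reset (x y : Int) (rest : List Int) (f point : Int) (h : ¬ (y - x < 2)) :
    find_facnum_go (x :: y :: rest) f point = find_facnum_go (y :: rest) 0 0 := by
  rw [ff_go_cons, if_neg h]

theorem ff_key (l : List Int) :
    find_facnum_go l 0 0 = find_facnum_win l (find_facnum_small l) := by
  induction l with
  | nil => rfl
  | cons x xs ih =>
    match xs with
    | [] => rfl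
    | [y] =>
      rw [ff_small_cons, ff_small_one]
      by_cases ha : y - x < 2
      · rw [ff_go_step0 _ _ _ ha]; rfl
      · rw [ff_go_reset _ _ _ _ _ ha]; rfl
    | [y, z] =>
      rw [ff_small_cons, ff_small_cons, ff_small_one, ff_win_short]
      by_cases ha : y - x < 2
      · rw [ff_go_step0 _ _ _ ha]
        by_cases hb : z - y < 2
        · rw [ff_go_step1 _ _ _ _ hb]; rfl
        · rw [ff_go_reset _ _ _ _ _ hb]; rfl
      · rw [ff_go_reset _ _ _ _ _ ha]
        by_cases hb : z - y < 2
        · rw [ff_go_step0 _ _ _ hb]; rfl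
        · rw [ff_go_reset _ _ _ _ _ hb]; rfl
    | y :: z :: w :: rest =>
      rw [ff_small_cons, ff_small_cons, ff_small_cons]
      rw [ff_small_cons, ff_small_cons] at ih
      by_cases ha : y - x < 2
      · rw [ff_go_step0 _ _ _ ha, ff_win_cons, decide_eq_true ha]
        by_cases hb : z - y < 2
        · rw [ff_go_step1 _ _ _ _ hb, decide_eq_true hb]
          by_cases hc : w - z < 2
          · rw [ff_go_step2 _ _ _ _ hc, decide_eq_true hc]; rfl
          · rw [ff_go_reset _ _ _ _ _ hc, decide_eq_false hc]
            simp only [Bool.and_false, Bool.false_eq_true, if_false]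
            rw [decide_eq_true hb, decide_eq_false hc] at ih
            rw [ff_go_step0 _ _ _ hb, ff_go_reset _ _ _ _ _ hc] at ih
            exact ih
        · rw [ff_go_reset _ _ _ _ _ hb, decide_eq_false hb]
          simp only [Bool.and_false, Bool.false_and, Bool.false_eq_true, if_false]
          rw [decide_eq_false hb] at ih
          rw [ff_go_reset _ _ _ _ _ hb] at ih
          exact ih
      · rw [ff_go_reset _ _ _ _ _ ha, ff_win_cons, decide_eq_false ha]
        simp only [Bool.false_and, Bool.false_eq_true, if_false]
        exact ih

-- ===== VERDICT (by name: the statement is the Claim_ definition above) =====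
theorem find_facnum_spec : Claim_equal_find_facnum := by
  intro l _
  unfold Spec_find_facnum find_facnum find_facnum_alt
  exact ff_key l
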